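-- pv_equiv track=rewrite | github.com/Hwon-J/TIL | algo/ag230131.py | solution
-- ===== SOURCE A (Python) =====
-- def solution(array, n):
--     lst=[]
--     for i in array:
--         a=abs(i-n)
--         lst.append(a)
--
--     b=sorted(lst)
--     if b[0]==b[1]:
--         return n-b[0]
--     else:
--         pass
-- ===== SOURCE B (Python) =====
-- def solution(array, n):
--     # One linear pass tracking the two smallest absolute differences (no sort).
--     m1 = m2 = None
--     for i in array:
--         d = abs(i - n)
--         if m1 is None or d < m1:
--             m1, m2 = d, m1
--         elif m2 is None or d < m2:
--             m2 = d
--     if m2 is not None and m1 == m2: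
--         return n - m1
--     return None
-- ===== Notes on version B (the rewrite author's own statement) =====
-- stated objective: faster
-- what changed: Replaces building a difference list and sorting it with a single pass that tracks only the two smallest absolute differences.
import Mathlib
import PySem

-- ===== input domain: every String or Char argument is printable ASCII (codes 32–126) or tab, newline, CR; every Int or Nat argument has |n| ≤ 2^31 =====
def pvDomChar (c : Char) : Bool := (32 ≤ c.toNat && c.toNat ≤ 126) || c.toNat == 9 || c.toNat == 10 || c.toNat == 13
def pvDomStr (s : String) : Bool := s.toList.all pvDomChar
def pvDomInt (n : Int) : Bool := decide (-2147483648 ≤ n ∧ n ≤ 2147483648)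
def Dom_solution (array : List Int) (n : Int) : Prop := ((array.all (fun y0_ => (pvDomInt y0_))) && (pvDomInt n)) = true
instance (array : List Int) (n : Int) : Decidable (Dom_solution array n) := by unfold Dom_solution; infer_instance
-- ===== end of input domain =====

-- B replaces A's build-list-then-sort with a single pass keeping the two smallest absolute differences (return value only).


-- ===== PORT A =====
def solution (array : List Int) (n : Int) : Option Int :=
  let lst := array.foldl (fun acc i => acc ++ [|i - n|]) []
  let b := PySem.List.sorted lst (fun x => x) false
  match PySem.List.pyGet? b 0, PySem.List.pyGet? b 1 with
  | some b0, some b1 => if b0 = b1 then some (n - b0) else none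
  | _, _ => none

-- ===== PORT B =====
-- one loop step of Source B: update (m1, m2), the two smallest differences seen so far
def pvStep (p : Option Int × Option Int) (d : Int) : Option Int × Option Int :=
  match p with
  | (none, _) => (some d, none)
  | (some m1, m2) =>
    if d < m1 then (some d, some m1)
    else
      match m2 with
      | none => (some m1, some d)
      | some m2v => if d < m2v then (some m1, some d) else (some m1, some m2v)

def solution_alt (array : List Int) (n : Int) : Option Int :=
  let p := array.foldl (fun p i => pvStep p |i - n|) (none, none)
  -- Source B: 'if m2 is not None and m1 == m2: return n - m1' (m2 set implies m1 set)
  match p.2 with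
  | none => none
  | some m2 =>
    match p.1 with
    | none => none
    | some m1 => if m1 = m2 then some (n - m1) else none

-- ===== PRECONDITION & SPEC =====
-- Pre_ excludes lists of fewer than 2 elements, on which A raises IndexError at b[0]/b[1].
def Pre_solution (array : List Int) (n : Int) : Prop := 2 ≤ array.length
instance (array : List Int) (n : Int) : Decidable (Pre_solution array n) := by unfold Pre_solution; infer_instance
def pvWitness_solution : List Int × Int := ([1, 2, 4], 3)

def Spec_solution (array : List Int) (n : Int) (out : Option Int) : Prop := out = solution_alt array n
instance (array : List Int) (n : Int) (out : Option Int) : Decidable (Spec_solution array n out) := by unfold Spec_solution; infer_instance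

-- ===== CLAIM (what is proved, stated in full; the proofs are below) =====
def Claim_equal_solution : Prop := ∀ (array : List Int) (n : Int), Dom_solution array n → Pre_solution array n → Spec_solution array n (solution array n)

-- ===== LEMMAS AND PROOFS =====

-- B's loop step on the first two entries of a list = first two entries after insertion-sort insert
theorem pvStep_firstTwo (d : Int) (s : List Int) :
    pvStep (s[0]?, s[1]?) d =
      ((PySem.List.insertBy (fun a b => decide (a < b)) d s)[0]?,
       (PySem.List.insertBy (fun a b => decide (a < b)) d s)[1]?) := by
  match s with
  | [] => rfl
  | [x] =>
    simp only [PySem.List.insertBy, pvStep]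
    by_cases h : d < x <;> simp [h]
  | x :: y :: u =>
    simp only [PySem.List.insertBy, pvStep]
    by_cases h1 : d < x <;> by_cases h2 : d < y <;> simp [h1, h2]

-- folding B's step over l, starting from the first two entries of s,
-- gives the first two entries of inserting all of l's differences into s
theorem pvFold_firstTwo (f : Int → Int) (l : List Int) (s : List Int) :
    l.foldl (fun p i => pvStep p (f i)) (s[0]?, s[1]?) =
      ((l.foldl (fun acc i => PySem.List.insertBy (fun a b => decide (a < b)) (f i) acc) s)[0]?,
       (l.foldl (fun acc i => PySem.List.insertBy (fun a b => decide (a < b)) (f i) acc) s)[1]?) := by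
  induction l generalizing s with
  | nil => rfl
  | cons a t ih =>
    simp only [List.foldl_cons, pvStep_firstTwo]
    exact ih _

theorem solution_eq_alt (array : List Int) (n : Int) :
    solution array n = solution_alt array n := by
  unfold solution solution_alt
  simp only [PySem.List.foldl_append_singleton_eq_map, List.nil_append,
      PySem.List.sorted_eq_foldl_insertBy, List.foldl_map]
  have h := pvFold_firstTwo (fun i => |i - n|) array []
  simp only [List.getElem?_nil] at h
  rw [h]
  have hg : ∀ (b : List Int), (PySem.List.pyGet? b 0, PySem.List.pyGet? b 1) = (b[0]?, b[1]?) := by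
    intro b
    simp [PySem.List.pyGet?, PySem.List.pyIdx?]
    refine ⟨?_, ?_⟩ <;> split_ifs with h <;>
      first
        | (simp; done)
        | (simp only [Option.bind]; rw [eq_comm, List.getElem?_eq_none] <;> omega)
  have hg0 := congrArg Prod.fst (hg (array.foldl (fun acc i => PySem.List.insertBy (fun a b => decide (a < b)) |i - n| acc) []))
  have hg1 := congrArg Prod.snd (hg (array.foldl (fun acc i => PySem.List.insertBy (fun a b => decide (a < b)) |i - n| acc) []))
  simp only at hg0 hg1
  rw [hg0, hg1]
  rcases (array.foldl (fun acc i => PySem.List.insertBy (fun a b => decide (a < b)) |i - n| acc) [])[0]? with _ | x <;>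
    rcases (array.foldl (fun acc i => PySem.List.insertBy (fun a b => decide (a < b)) |i - n| acc) [])[1]? with _ | y <;>
      rfl

-- ===== VERDICT (by name: the statement is the Claim_ definition above) =====
theorem solution_spec : Claim_equal_solution := by
  intro array n _ _
  unfold Spec_solution
  exact solution_eq_alt array n
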